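-- pv_equiv track=rewrite | github.com/darthsuogles/phissenschaft | algo/meeting_rooms.py | check_non_overlapping
-- ===== SOURCE A (Python) =====
-- def check_non_overlapping(meetings):
--     if not meetings: return True
--     meetings = sorted(meetings, key=lambda intv: intv[1])
--     n = len(meetings)
--     # The return value i is such that all e in a[:i] have e <= x,
--     # and all e in  a[i:] have e > x.
--     from bisect import bisect_right
--     end_times = [intv[1] for intv in meetings]
--     for i in range(n - 1, -1, -1):
--         intv = meetings[i]
--         j = bisect_right(end_times, intv[0])
--         if j < i: return False
--
--     return True
-- ===== SOURCE B (Python) =====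
-- def check_non_overlapping(meetings):
--     ms = sorted(meetings, key=lambda intv: intv[1])
--     return all(prev[1] <= cur[0] for prev, cur in zip(ms, ms[1:]))
-- ===== Notes on version B (the rewrite author's own statement) =====
-- stated objective: simpler
-- what changed: A sorts by end time and then runs n bisect_right binary searches over the end-time list, comparing each count against the index; B sorts by end time once and does a single adjacent-pair scan checking prev_end <= cur_start, with no index arithmetic or binary searches.
import Mathlib
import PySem

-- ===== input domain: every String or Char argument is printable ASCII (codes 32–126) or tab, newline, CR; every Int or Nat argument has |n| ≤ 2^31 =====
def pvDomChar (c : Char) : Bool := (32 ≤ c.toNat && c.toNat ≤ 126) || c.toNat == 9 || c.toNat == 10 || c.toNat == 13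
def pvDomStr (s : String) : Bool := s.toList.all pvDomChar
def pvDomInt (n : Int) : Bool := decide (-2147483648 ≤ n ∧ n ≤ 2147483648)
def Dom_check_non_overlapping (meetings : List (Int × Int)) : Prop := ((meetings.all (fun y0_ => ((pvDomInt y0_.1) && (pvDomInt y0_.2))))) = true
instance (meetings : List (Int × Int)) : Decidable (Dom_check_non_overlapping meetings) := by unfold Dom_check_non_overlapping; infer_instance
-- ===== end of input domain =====

-- B replaces A's n bisect_right lookups (count-vs-index tests) by one adjacent-pair
-- scan over the same end-sorted list: simpler, same O(n log n) cost.

-- ===== PORT A =====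
-- the reversed for-loop with its early 'return False'
def pvLoopA (ms : List (Int × Int)) (end_times : List Int) : List Int → Bool
  | [] => true
  | i :: rest =>
      let intv := PySem.List.pyGetD ms i (0, 0)
      let j := PySem.List.bisectRight end_times intv.1
      if (j : Int) < i then false else pvLoopA ms end_times rest

def check_non_overlapping (meetings : List (Int × Int)) : Bool :=
  if meetings = [] then true
  else
    let ms := PySem.List.sorted meetings (fun intv => intv.2)
    let n : Int := ms.length
    let end_times := ms.map (fun intv => intv.2)
    pvLoopA ms end_times (PySem.List.pyRange (n - 1) (-1) (-1))

-- ===== PORT B =====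
-- the all(...) over zip(ms, ms[1:])
def pvAdjOk (ms : List (Int × Int)) : Bool :=
  (ms.zip (PySem.List.slice ms (some 1))).all (fun pc => decide (pc.1.2 ≤ pc.2.1))

def check_non_overlapping_alt (meetings : List (Int × Int)) : Bool :=
  pvAdjOk (PySem.List.sorted meetings (fun intv => intv.2))

-- ===== PRECONDITION & SPEC =====
def Spec_check_non_overlapping (meetings : List (Int × Int)) (out : Bool) : Prop := out = check_non_overlapping_alt meetings
instance (meetings : List (Int × Int)) (out : Bool) : Decidable (Spec_check_non_overlapping meetings out) := by unfold Spec_check_non_overlapping; infer_instance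

-- ===== CLAIM (what is proved, stated in full; the proofs are below) =====
def Claim_equal_check_non_overlapping : Prop := ∀ (meetings : List (Int × Int)), Dom_check_non_overlapping meetings → Spec_check_non_overlapping meetings (check_non_overlapping meetings)

-- ===== LEMMAS AND PROOFS =====

-- A's loop is an 'all' over the index list
theorem pvLoopA_eq_all (ms : List (Int × Int)) (ets : List Int) (l : List Int) :
    pvLoopA ms ets l
      = l.all (fun i =>
          !decide ((PySem.List.bisectRight ets (PySem.List.pyGetD ms i (0, 0)).1 : Int) < i)) := by
  induction l with
  | nil => rfl
  | cons i rest ih =>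
      simp only [pvLoopA, List.all_cons, ih]
      by_cases h : (PySem.List.bisectRight ets (PySem.List.pyGetD ms i (0, 0)).1 : Int) < i <;>
        simp [h]

-- per-index characterisation of A's bisect test on an end-sorted list
theorem pv_bisect_test (ms : List (Int × Int)) (hs : List.Pairwise (fun x1 x2 => x1 ≤ x2) (ms.map (·.2)))
    (k : Nat) (hk : k < ms.length) :
    ((k : Int) ≤ (PySem.List.bisectRight (ms.map (·.2)) ms[k].1 : Int))
      ↔ (k = 0 ∨ ∀ _ : k - 1 < ms.length, ms[k - 1].2 ≤ ms[k].1) := by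
  obtain ⟨hle, hlo, hhi⟩ := PySem.List.bisectRight_spec (ms.map (·.2)) ms[k].1 hs
  constructor
  · intro hki
    rcases Nat.eq_zero_or_pos k with h0 | hpos
    · exact Or.inl h0
    · refine Or.inr (fun h => ?_)
      have hlt : k - 1 < PySem.List.bisectRight (ms.map (·.2)) ms[k].1 := by omega
      have := hlo (k - 1) (by simpa using h) hlt
      simpa using this
  · rintro (h0 | hend)
    · subst h0; exact_mod_cast Nat.zero_le _
    · by_contra hlt
      rcases Nat.eq_zero_or_pos k with h0 | hpos
      · omega
      · have hj : PySem.List.bisectRight (ms.map (·.2)) ms[k].1 ≤ k - 1 := by omega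
        have := hhi (k - 1) (by simp; omega) hj
        have h2 := hend (by omega)
        simp at this
        omega

-- A, characterised over the end-sorted list: every adjacent pair is compatible
theorem pv_A_iff (meetings : List (Int × Int)) (hnil : meetings ≠ []) :
    (check_non_overlapping meetings = true) ↔
      ∀ k : Nat, (_ : k < (PySem.List.sorted meetings (fun intv => intv.2)).length) → k ≠ 0 →
        (PySem.List.sorted meetings (fun intv => intv.2))[k - 1].2
          ≤ (PySem.List.sorted meetings (fun intv => intv.2))[k].1 := by
  have hs : List.Pairwise (fun x1 x2 => x1 ≤ x2)
      ((PySem.List.sorted meetings (fun intv => intv.2)).map (·.2)) :=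
    PySem.List.sorted_map_key_pairwise meetings (fun intv => intv.2)
  unfold check_non_overlapping
  rw [if_neg hnil, pvLoopA_eq_all, List.all_eq_true]
  constructor
  · intro h k hk hk0
    have hmem : (k : Int) ∈ PySem.List.pyRange
        (((PySem.List.sorted meetings (fun intv => intv.2)).length : Int) - 1) (-1) (-1) := by
      rw [PySem.List.mem_pyRange_neg_one]; omega
    have hnot := h _ hmem
    rw [PySem.List.pyGetD_of_nonneg _ _ (by omega)] at hnot
    simp only [Int.toNat_natCast, List.getD_eq_getElem _ _ hk, Bool.not_eq_eq_eq_not,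
      Bool.not_true, decide_eq_false_iff_not, not_lt] at hnot
    have := (pv_bisect_test _ hs k hk).mp hnot
    rcases this with h0 | h1
    · omega
    · exact h1 (by omega)
  · intro h i hmem
    rw [PySem.List.mem_pyRange_neg_one] at hmem
    obtain ⟨k, rfl⟩ : ∃ k : Nat, i = (k : Int) := ⟨i.toNat, by omega⟩
    have hk : k < (PySem.List.sorted meetings (fun intv => intv.2)).length := by omega
    simp only [Bool.not_eq_eq_eq_not, Bool.not_true, decide_eq_false_iff_not, not_lt]
    rw [PySem.List.pyGetD_of_nonneg _ _ (by omega)]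
    simp only [Int.toNat_natCast, List.getD_eq_getElem _ _ hk]
    refine (pv_bisect_test _ hs k hk).mpr ?_
    rcases Nat.eq_zero_or_pos k with h0 | hpos
    · exact Or.inl h0
    · exact Or.inr (fun _ => h k hk (by omega))

-- B, characterised the same way
theorem pvAdjOk_iff (ms : List (Int × Int)) :
    (pvAdjOk ms = true) ↔
      ∀ k : Nat, (_ : k < ms.length) → k ≠ 0 → ms[k - 1].2 ≤ ms[k].1 := by
  unfold pvAdjOk
  rw [PySem.List.slice_from _ (by norm_num), List.all_eq_true]
  simp only [Int.toNat_one]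
  constructor
  · intro h k hk hk0
    have hlen : k - 1 < (ms.zip (ms.drop 1)).length := by
      simp only [List.length_zip, List.length_drop]; omega
    have := h _ (List.getElem_mem hlen)
    rw [List.getElem_zip] at this
    simp only [decide_eq_true_eq, List.getElem_drop] at this
    have hidx : 1 + (k - 1) = k := by omega
    simpa only [hidx] using this
  · intro h p hp
    obtain ⟨j, hj, hpe⟩ := List.getElem_of_mem hp
    subst hpe
    rw [List.getElem_zip]
    simp only [decide_eq_true_eq, List.getElem_drop]
    have hj' : j + 1 < ms.length := by
      simp only [List.length_zip, List.length_drop] at hj; omega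
    have := h (j + 1) hj' (by omega)
    simp only [Nat.add_sub_cancel] at this
    have hidx : 1 + j = j + 1 := by omega
    simpa only [hidx] using this

theorem pv_B_iff (meetings : List (Int × Int)) :
    (check_non_overlapping_alt meetings = true) ↔
      ∀ k : Nat, (_ : k < (PySem.List.sorted meetings (fun intv => intv.2)).length) → k ≠ 0 →
        (PySem.List.sorted meetings (fun intv => intv.2))[k - 1].2
          ≤ (PySem.List.sorted meetings (fun intv => intv.2))[k].1 := by
  unfold check_non_overlapping_alt
  exact pvAdjOk_iff _

theorem check_non_overlapping_eq (meetings : List (Int × Int)) :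
    check_non_overlapping meetings = check_non_overlapping_alt meetings := by
  by_cases hnil : meetings = []
  · subst hnil; rfl
  · exact Bool.eq_iff_iff.mpr ((pv_A_iff meetings hnil).trans (pv_B_iff meetings).symm)

-- ===== VERDICT (by name: the statement is the Claim_ definition above) =====
theorem check_non_overlapping_spec : Claim_equal_check_non_overlapping := by
  intro meetings _
  unfold Spec_check_non_overlapping
  exact check_non_overlapping_eq meetings
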